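-- pv_equiv track=rewrite | github.com/jtowler/adventofcode19 | src/advent20/day6.py | get_qs
-- ===== SOURCE A (Python) =====
-- from collections import Counter
-- from typing import List
--
-- def get_qs(data: List[str]):
--     qs = []
--     q = []
--     ls = []
--     l = 0
--     for ln in data:
--         if ln == '\n':
--             qs.append(Counter(q))
--             ls.append(l)
--             q = []
--             l = 0
--         else:
--             q += ln.rstrip('\n')
--             l += 1
--     qs.append(Counter(q))
--     ls.append(l)
--     return qs, ls
-- ===== SOURCE B (Python) =====
-- from collections import Counter, deque
--
-- def get_qs(data):
--     # Phase 1: partition into group-sublists back-to-front (every '\n' cuts;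
--     # one trailing group is always present, so empty input gives one empty group).
--     groups = deque([deque()])
--     for ln in reversed(data):
--         if ln == '\n':
--             groups.appendleft(deque())
--         else:
--             groups[0].appendleft(ln)
--     # Phase 2: aggregate each group independently.
--     qs = [Counter(''.join(line.rstrip('\n') for line in g)) for g in groups]
--     ls = [len(g) for g in groups]
--     return qs, ls
-- ===== Notes on version B (the rewrite author's own statement) =====
-- stated objective: alternative
-- what changed: Replaces the sentinel-driven single mutable pass (running Counter list + length flushed at each separator) with a group-first/aggregate-second decomposition: a back-to-front partition of the lines at '\n' markers, then independent per-group Counter/length maps unzipped into the two result lists.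
import Mathlib
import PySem

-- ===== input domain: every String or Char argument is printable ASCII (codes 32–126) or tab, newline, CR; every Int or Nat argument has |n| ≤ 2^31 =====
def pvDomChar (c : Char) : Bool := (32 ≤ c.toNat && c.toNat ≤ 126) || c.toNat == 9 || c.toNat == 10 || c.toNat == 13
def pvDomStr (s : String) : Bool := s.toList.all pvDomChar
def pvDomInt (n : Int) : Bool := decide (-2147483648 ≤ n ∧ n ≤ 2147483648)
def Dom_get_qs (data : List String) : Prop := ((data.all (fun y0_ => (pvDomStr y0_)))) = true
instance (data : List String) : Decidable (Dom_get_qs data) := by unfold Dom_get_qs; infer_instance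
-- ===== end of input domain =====

-- B replaces A's sentinel-driven mutable pass by a partition-into-groups phase followed by
-- independent per-group aggregation (objective: alternative decomposition, same cost).

-- shared library helpers (the same Python library calls appear in both A and B):
-- ln.rstrip('\n') — trailing-'\n' strip, ported by hand (exact: drop trailing '\n' chars), as 1-char strings
def rstripNl (s : String) : List String :=
  ((s.toList.reverse.dropWhile (fun c => c == '\n')).reverse).map (fun c => String.ofList [c])
-- Counter(xs) returned as its items list
def counterItems (q : List String) : List (String × Int) := (PySem.Dict.counter q).items

-- ===== PORT A =====
def get_qs (data : List String) : (List (List (String × Int))) × List Int :=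
  let st := data.foldl
    (fun (st : List (List (String × Int)) × List String × List Int × Int) ln =>
      let (qs, q, ls, l) := st
      if ln = "\n" then (qs ++ [counterItems q], [], ls ++ [l], 0)
      else (qs, q ++ rstripNl ln, ls, l + 1))
    ([], [], [], 0)
  (st.1 ++ [counterItems st.2.1], st.2.2.1 ++ [st.2.2.2])

-- ===== PORT B =====
-- phase 1: cut data at '\n' lines, built back-to-front (reversed iteration, prepends)
def splitGroups (data : List String) : List (List String) :=
  data.foldr
    (fun ln gs =>
      if ln = "\n" then [] :: gs
      else
        match gs with
        | g :: rest => (ln :: g) :: rest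
        | [] => [[ln]])
    [[]]

-- ''.join(line.rstrip('\n') for line in g), as the list of its 1-char strings
def groupChars (g : List String) : List String := (g.map rstripNl).flatten

def get_qs_alt (data : List String) : (List (List (String × Int))) × List Int :=
  let gs := splitGroups data
  (gs.map (fun g => counterItems (groupChars g)), gs.map (fun g => (g.length : Int)))

-- ===== PRECONDITION & SPEC =====
def Spec_get_qs (data : List String) (out : (List (List (String × Int))) × List Int) : Prop := out = get_qs_alt data
instance (data : List String) (out : (List (List (String × Int))) × List Int) : Decidable (Spec_get_qs data out) := by unfold Spec_get_qs; infer_instance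

-- ===== CLAIM (what is proved, stated in full; the proofs are below) =====
def Claim_equal_get_qs : Prop := ∀ (data : List String), Dom_get_qs data → Spec_get_qs data (get_qs data)

-- ===== LEMMAS AND PROOFS =====

-- the first-occurrence Counter lists A would flush, given pending chars q merged into the head group
def qlists (q : List String) : List (List String) → List (List String)
  | [] => [q]
  | g :: gs => (q ++ groupChars g) :: gs.map groupChars

-- the lengths A would flush, given pending count l merged into the head group
def llist (l : Int) : List (List String) → List Int
  | [] => [l]
  | g :: gs => (l + g.length) :: gs.map (fun g => (g.length : Int))

theorem splitGroups_ne_nil (data : List String) : splitGroups data ≠ [] := by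
  induction data with
  | nil => simp [splitGroups]
  | cons ln rest ih =>
    simp only [splitGroups, List.foldr] at *
    split
    · simp
    · match h : List.foldr _ [[]] rest with
      | [] => exact absurd h ih
      | g :: gs => simp

theorem qlists_nil_eq (G : List (List String)) (h : G ≠ []) :
    qlists [] G = G.map groupChars := by
  cases G with
  | nil => exact absurd rfl h
  | cons g gs => simp [qlists]

theorem llist_zero_eq (G : List (List String)) (h : G ≠ []) :
    llist 0 G = G.map (fun g => (g.length : Int)) := by
  cases G with
  | nil => exact absurd rfl h
  | cons g gs => simp [llist]

theorem splitGroups_cons (ln : String) (rest : List String) :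
    splitGroups (ln :: rest) =
      if ln = "\n" then [] :: splitGroups rest
      else
        match splitGroups rest with
        | g :: gs => (ln :: g) :: gs
        | [] => [[ln]] := rfl

theorem loop_eq (data : List String) :
    ∀ (qs : List (List (String × Int))) (q : List String) (ls : List Int) (l : Int),
    (let st := data.foldl
        (fun (st : List (List (String × Int)) × List String × List Int × Int) ln =>
          let (qs, q, ls, l) := st
          if ln = "\n" then (qs ++ [counterItems q], [], ls ++ [l], 0)
          else (qs, q ++ rstripNl ln, ls, l + 1))
        (qs, q, ls, l)
     (st.1 ++ [counterItems st.2.1], st.2.2.1 ++ [st.2.2.2])) =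
    (qs ++ (qlists q (splitGroups data)).map counterItems, ls ++ llist l (splitGroups data)) := by
  induction data with
  | nil =>
    intro qs q ls l
    simp [splitGroups, qlists, llist, groupChars]
  | cons ln rest ih =>
    intro qs q ls l
    rw [splitGroups_cons]
    simp only [List.foldl_cons]
    obtain ⟨g, gs, hg⟩ : ∃ g gs, splitGroups rest = g :: gs := by
      cases h : splitGroups rest with
      | nil => exact absurd h (splitGroups_ne_nil rest)
      | cons g gs => exact ⟨g, gs, rfl⟩
    by_cases hln : ln = "\n"
    · rw [if_pos hln, if_pos hln, ih, hg]
      simp [qlists, llist, groupChars]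
    · rw [if_neg hln, if_neg hln, hg, ih, hg]
      simp only [qlists, llist, groupChars, List.map, List.flatten, List.append_assoc,
        List.length_cons, Prod.mk.injEq]
      refine ⟨rfl, ?_⟩
      congr 2
      push_cast
      ring

-- ===== VERDICT (by name: the statement is the Claim_ definition above) =====
theorem get_qs_spec : Claim_equal_get_qs := by
  intro data _
  unfold Spec_get_qs get_qs get_qs_alt
  rw [loop_eq data [] [] [] 0]
  rw [qlists_nil_eq _ (splitGroups_ne_nil data), llist_zero_eq _ (splitGroups_ne_nil data)]
  simp
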